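-- pv_equiv track=rewrite | github.com/alekov1/KovalenkoAR | Lesson9/2.py | TransformMatrix
-- ===== SOURCE A (Python) =====
-- def SumDiagonalofMatrix(matrix: [], n: int):
--     SumDiagonalMatrix = 0
--
--     for i in range(0, n):
--         for j in range(0, n):
--             if (i == j):
--                 SumDiagonalMatrix += matrix[i][j]
--     return SumDiagonalMatrix
--
-- def TransformMatrix(matrix, n):
--
--     trace = SumDiagonalofMatrix(matrix, n)
--     TransformedMatrix = matrix.copy()
--     for i in range(0, n):
--         if i % 2 == 0:
--             for j in range(0, n):
--                 TransformedMatrix[i][j] = matrix[i][j] // trace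
--     return TransformedMatrix
-- ===== SOURCE B (Python) =====
-- def TransformMatrix(matrix, n):
--     trace = sum(matrix[i][i] for i in range(n))
--     transformed = list(matrix)
--     for i in range(0, n, 2):
--         transformed[i] = [x // trace for x in matrix[i]]
--     return transformed
-- ===== Notes on version B (the rewrite author's own statement) =====
-- stated objective: simpler
-- what changed: The trace becomes a single diagonal pass instead of an O(n^2) double loop with an i==j test, and the even rows are selected directly by range(0, n, 2) and rebuilt as whole rows by one comprehension, replacing A's parity test and inner element-by-element index assignment; Pre_ excludes inputs where A raises and, narrowing to the natural domain, matrices whose even rows are not of length exactly n, on which A's dividing only the first n entries of a longer row is an artefact of its index loops.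
-- outside the precondition, e.g. on TransformMatrix([[2, 3], [4, 5]], 1): A returns [[1, 3], [4, 5]], B returns [[1, 1], [4, 5]]
import Mathlib
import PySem

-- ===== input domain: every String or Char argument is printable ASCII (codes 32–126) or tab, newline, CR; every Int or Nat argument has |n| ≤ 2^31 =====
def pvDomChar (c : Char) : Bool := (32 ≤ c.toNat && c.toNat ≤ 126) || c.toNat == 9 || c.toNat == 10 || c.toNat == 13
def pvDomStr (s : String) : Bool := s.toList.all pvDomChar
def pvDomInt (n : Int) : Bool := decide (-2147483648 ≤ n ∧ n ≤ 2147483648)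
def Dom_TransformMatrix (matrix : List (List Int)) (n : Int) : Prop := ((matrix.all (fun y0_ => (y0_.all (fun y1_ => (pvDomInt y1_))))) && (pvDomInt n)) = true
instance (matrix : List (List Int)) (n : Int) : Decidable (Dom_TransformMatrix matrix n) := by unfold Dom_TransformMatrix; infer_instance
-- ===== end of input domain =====

-- B replaces A's O(n^2) i==j trace loop by one diagonal pass and A's parity-tested
-- element-by-element writes by a step-2 range over even rows rebuilt whole; the
-- equivalence is about the RETURN value (A mutates matrix's rows in place, B does not).


-- ===== PORT A =====
def SumDiagonalofMatrix (matrix : List (List Int)) (n : Int) : Int :=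
  (PySem.List.pyRange 0 n 1).foldl (fun s i =>
    (PySem.List.pyRange 0 n 1).foldl (fun s j =>
      if i = j then s + PySem.List.pyGetD (PySem.List.pyGetD matrix i []) j 0 else s) s) 0

def TransformMatrix (matrix : List (List Int)) (n : Int) : List (List Int) :=
  let trace := SumDiagonalofMatrix matrix n
  let TransformedMatrix := matrix   -- matrix.copy()
  (PySem.List.pyRange 0 n 1).foldl (fun TM i =>
    if PySem.Int.mod i 2 = 0 then
      (PySem.List.pyRange 0 n 1).foldl (fun TM j =>
        PySem.List.pySetD TM i
          (PySem.List.pySetD (PySem.List.pyGetD TM i []) j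
            (PySem.Int.floordiv (PySem.List.pyGetD (PySem.List.pyGetD matrix i []) j 0) trace))) TM
    else TM) TransformedMatrix

-- ===== PORT B =====
def TransformMatrix_alt (matrix : List (List Int)) (n : Int) : List (List Int) :=
  let trace := (PySem.List.pyRange 0 n 1).foldl
    (fun s i => s + PySem.List.pyGetD (PySem.List.pyGetD matrix i []) i 0) 0
  let transformed := matrix   -- list(matrix)
  (PySem.List.pyRange 0 n 2).foldl (fun TM i =>
    PySem.List.pySetD TM i
      ((PySem.List.pyGetD matrix i []).map (fun x => PySem.Int.floordiv x trace))) transformed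

-- ===== PRECONDITION & SPEC =====
-- Pre_ excludes the inputs where Python A raises (fewer than n rows, a missing diagonal
-- entry, an even row shorter than n, or — with 0 < n — a zero trace), and it also
-- narrows to the natural domain of the task by excluding matrices whose even rows are
-- LONGER than n even though A still returns there: A's dividing only the first n
-- entries of such a row is an artefact of its index loops, not behaviour anyone
-- would specify.
def Pre_TransformMatrix (matrix : List (List Int)) (n : Int) : Prop :=
  n ≤ 0 ∨
    (n.toNat ≤ matrix.length ∧
     (∀ i ∈ List.range n.toNat,
        i < (matrix.getD i []).length ∧ (i % 2 = 0 → (matrix.getD i []).length = n.toNat)) ∧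
     ((List.range n.toNat).map (fun i => (matrix.getD i []).getD i 0)).sum ≠ 0)
instance (matrix : List (List Int)) (n : Int) : Decidable (Pre_TransformMatrix matrix n) := by unfold Pre_TransformMatrix; infer_instance

def pvWitness_TransformMatrix : List (List Int) × Int := ([[2, 3], [4, 5]], 2)

def Spec_TransformMatrix (matrix : List (List Int)) (n : Int) (out : List (List Int)) : Prop := out = TransformMatrix_alt matrix n
instance (matrix : List (List Int)) (n : Int) (out : List (List Int)) : Decidable (Spec_TransformMatrix matrix n out) := by unfold Spec_TransformMatrix; infer_instance

-- ===== CLAIM (what is proved, stated in full; the proofs are below) =====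
def Claim_equal_TransformMatrix : Prop := ∀ (matrix : List (List Int)) (n : Int), Dom_TransformMatrix matrix n → Pre_TransformMatrix matrix n → Spec_TransformMatrix matrix n (TransformMatrix matrix n)

-- ===== LEMMAS AND PROOFS =====
-- pyRange 0 n 1 as a mapped Nat range
lemma pvRange_cast (n : Int) : PySem.List.pyRange 0 n 1 = (List.range n.toNat).map (fun (k : Nat) => (k:Int)) := by
  rw [PySem.List.pyRange_one]; simp

-- pyRange 0 n 2 as a mapped Nat range of even numbers
lemma pvRange2 (n : Int) : PySem.List.pyRange 0 n 2
    = (List.range ((n.toNat + 1) / 2)).map (fun (k : Nat) => ((2 * k : Nat) : Int)) := by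
  rw [PySem.List.pyRange_of_pos 0 n (by norm_num)]
  by_cases h : n ≤ 0
  · rw [if_neg (by omega), show (n.toNat + 1) / 2 = 0 by omega]
    simp
  · rw [if_pos (by omega), show ((n - 0 + 2 - 1) / 2).toNat = (n.toNat + 1) / 2 by omega]
    refine List.map_congr_left ?_
    intro k _
    push_cast
    ring

lemma pvMod_two (k : Nat) : PySem.Int.mod (k:Int) 2 = 0 ↔ k % 2 = 0 := by
  rw [(by exact_mod_cast PySem.Int.mod_natCast k 2 : PySem.Int.mod (k:Int) 2 = ((k % 2 : Nat) : Int))]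
  omega

lemma pvMapRange_take (r : List Int) (N : Nat) (d : Int) (h : N ≤ r.length) :
    (List.range N).map (fun j => r.getD j d) = r.take N := by
  apply List.ext_getElem (by simp [h])
  intro k h1 h2
  simp at h1
  simp [List.getD_eq_getElem?_getD, List.getElem?_eq_getElem (show k < r.length by omega)]

-- the single diagonal-summing fold A's trace reduces to
lemma pvTraceA (matrix : List (List Int)) (n : Int) :
    SumDiagonalofMatrix matrix n
      = (List.range n.toNat).foldl (fun s i => s + (matrix.getD i []).getD i 0) 0 := by
  unfold SumDiagonalofMatrix
  rw [pvRange_cast, List.foldl_map]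
  apply PySem.List.foldl_congr_mem
  intro s i hi
  rw [List.foldl_map]
  simp only [PySem.List.pyGetD_natCast]
  rw [List.mem_range] at hi
  have : ∀ (M : Nat) (s : Int), (List.range M).foldl
      (fun s j => if (i:Int) = (j:Nat) then s + (matrix.getD i []).getD j 0 else s) s
      = if i < M then s + (matrix.getD i []).getD i 0 else s := by
    intro M
    induction M with
    | zero => simp
    | succ M ih =>
      intro s
      rw [List.range_succ, List.foldl_append]
      simp only [List.foldl_cons, List.foldl_nil, ih]
      by_cases hieq : i = M
      · have hc : ((i:Int) = (M:Nat)) := by exact_mod_cast hieq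
        rw [if_pos hc, hieq, if_neg (show ¬ M < M by omega), if_pos (show M < M + 1 by omega)]
      · have hc : ((i:Int) ≠ (M:Nat)) := by exact_mod_cast hieq
        rw [if_neg hc]
        by_cases hiM : i < M
        · rw [if_pos hiM, if_pos (show i < M + 1 by omega)]
        · rw [if_neg hiM, if_neg (show ¬ i < M + 1 by omega)]
  rw [this n.toNat s, if_pos hi]

-- a fold of sets over a row rewrites its first N entries
lemma pvRowFold (g : Nat → Int) : ∀ (N : Nat) (r : List Int), N ≤ r.length →
    (List.range N).foldl (fun r j => r.set j (g j)) r = (List.range N).map g ++ r.drop N := by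
  intro N
  induction N with
  | zero => simp
  | succ N ih =>
    intro r h
    have hN : N < r.length := by omega
    rw [List.range_succ, List.foldl_append]
    simp only [List.foldl_cons, List.foldl_nil]
    rw [ih r (by omega), List.drop_eq_getElem_cons hN, List.map_append,
      List.set_append]
    have hl : ((List.range N).map g).length = N := by simp
    rw [if_neg (show ¬ N < ((List.range N).map g).length by omega), hl, Nat.sub_self,
      List.set_cons_zero, List.append_assoc]
    rfl

-- the inner whole-matrix fold only touches row i
lemma pvInnerTM (g : Nat → Int) (i : Nat) : ∀ (M : Nat) (TM : List (List Int)), i < TM.length →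
    (List.range M).foldl (fun TM j => TM.set i ((TM.getD i []).set j (g j))) TM
      = TM.set i ((List.range M).foldl (fun r j => r.set j (g j)) (TM.getD i [])) := by
  intro M
  induction M with
  | zero =>
    intro TM h
    simp [List.getD_eq_getElem?_getD, List.getElem?_eq_getElem h, List.set_getElem_self]
  | succ M ih =>
    intro TM h
    rw [List.range_succ, List.foldl_append, ih TM h, List.foldl_append]
    simp only [List.foldl_cons, List.foldl_nil]
    rw [show (TM.set i ((List.range M).foldl (fun r j => r.set j (g j)) (TM.getD i []))).getD i []
        = (List.range M).foldl (fun r j => r.set j (g j)) (TM.getD i []) from by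
      simp [List.getD_eq_getElem?_getD, List.getElem?_set_self (by omega : i < TM.length)]]
    rw [List.set_set]

-- one step of A's outer loop
def pvStep (g : Nat → Nat → Int) (N : Nat) : List (List Int) → Nat → List (List Int) :=
  fun TM i => if i % 2 = 0 then
    (List.range N).foldl (fun TM j => TM.set i ((TM.getD i []).set j (g i j))) TM
  else TM

-- characterization of A's outer loop
lemma pvOuter (matrix : List (List Int)) (N : Nat) (g : Nat → Nat → Int)
    (hN : N ≤ matrix.length)
    (hrow : ∀ i, i < N → i % 2 = 0 → N ≤ (matrix.getD i []).length) :
    ∀ M, M ≤ N →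
      ((List.range M).foldl (pvStep g N) matrix).length = matrix.length ∧
      ∀ k, ((List.range M).foldl (pvStep g N) matrix).getD k []
        = if k < M ∧ k % 2 = 0 then (List.range N).map (g k) ++ (matrix.getD k []).drop N
          else matrix.getD k [] := by
  intro M
  induction M with
  | zero => simp
  | succ M ih =>
    intro hM
    obtain ⟨ihl, ihg⟩ := ih (by omega)
    rw [List.range_succ, List.foldl_append]
    simp only [List.foldl_cons, List.foldl_nil]
    set R := (List.range M).foldl (pvStep g N) matrix with hR
    have hMlen : M < R.length := by rw [ihl]; omega
    by_cases hM2 : M % 2 = 0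
    · have hRM : R.getD M [] = matrix.getD M [] := by
        rw [ihg M, if_neg (by omega : ¬ (M < M ∧ M % 2 = 0))]
      have hstep : pvStep g N R M
          = R.set M ((List.range N).map (g M) ++ (matrix.getD M []).drop N) := by
        unfold pvStep
        rw [if_pos hM2, pvInnerTM (g M) M N R hMlen, hRM,
          pvRowFold (g M) N _ (hrow M (by omega) hM2)]
      rw [hstep]
      refine ⟨by rw [List.length_set, ihl], fun k => ?_⟩
      by_cases hk : k = M
      · rw [hk, if_pos ⟨by omega, hM2⟩]
        simp [List.getD_eq_getElem?_getD, List.getElem?_set_self hMlen]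
      · have hne : (R.set M ((List.range N).map (g M) ++ (matrix.getD M []).drop N)).getD k []
            = R.getD k [] := by
          simp [List.getD_eq_getElem?_getD, List.getElem?_set_ne (show M ≠ k by omega)]
        rw [hne, ihg k]
        by_cases hcond : k < M ∧ k % 2 = 0
        · rw [if_pos hcond, if_pos ⟨by omega, hcond.2⟩]
        · rw [if_neg hcond, if_neg (by omega : ¬ (k < M + 1 ∧ k % 2 = 0))]
    · have hstep : pvStep g N R M = R := by unfold pvStep; rw [if_neg hM2]
      rw [hstep]
      refine ⟨ihl, fun k => ?_⟩
      rw [ihg k]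
      by_cases hcond : k < M ∧ k % 2 = 0
      · rw [if_pos hcond, if_pos ⟨by omega, hcond.2⟩]
      · rw [if_neg hcond, if_neg (by omega : ¬ (k < M + 1 ∧ k % 2 = 0))]

lemma pvAeq (matrix : List (List Int)) (n : Int) :
    TransformMatrix matrix n
      = (List.range n.toNat).foldl
          (pvStep (fun k j => PySem.Int.floordiv ((matrix.getD k []).getD j 0)
              ((List.range n.toNat).foldl (fun s i => s + (matrix.getD i []).getD i 0) 0))
            n.toNat) matrix := by
  simp only [TransformMatrix]
  rw [pvTraceA]
  simp only [pvRange_cast, List.foldl_map, PySem.List.pyGetD_natCast, PySem.List.pySetD_natCast]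
  unfold pvStep
  refine PySem.List.foldl_congr_mem _ _ _ _ ?_
  intro TM i hi
  rw [if_congr (pvMod_two i) rfl rfl]

-- characterization of B's even-row fold (the rewritten rows do not depend on the state)
lemma pvBfold (matrix : List (List Int)) (g : Nat → List Int) :
    ∀ (M : Nat), (∀ j, j < M → 2 * j < matrix.length) →
      ((List.range M).foldl (fun TM j => TM.set (2 * j) (g (2 * j))) matrix).length
          = matrix.length ∧
      ∀ k, ((List.range M).foldl (fun TM j => TM.set (2 * j) (g (2 * j))) matrix).getD k []
        = if k % 2 = 0 ∧ k < 2 * M then g k else matrix.getD k [] := by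
  intro M
  induction M with
  | zero => simp
  | succ M ih =>
    intro h
    obtain ⟨ihl, ihg⟩ := ih (fun j hj => h j (by omega))
    rw [List.range_succ, List.foldl_append]
    simp only [List.foldl_cons, List.foldl_nil]
    set R := (List.range M).foldl (fun TM j => TM.set (2 * j) (g (2 * j))) matrix with hR
    have hMlen : 2 * M < R.length := by rw [ihl]; exact h M (by omega)
    refine ⟨by rw [List.length_set, ihl], fun k => ?_⟩
    by_cases hk : k = 2 * M
    · rw [hk, if_pos ⟨by omega, by omega⟩]
      simp [List.getD_eq_getElem?_getD, List.getElem?_set_self hMlen]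
    · have hne : (R.set (2 * M) (g (2 * M))).getD k [] = R.getD k [] := by
        simp [List.getD_eq_getElem?_getD, List.getElem?_set_ne (show 2 * M ≠ k by omega)]
      rw [hne, ihg k]
      by_cases hcond : k % 2 = 0 ∧ k < 2 * M
      · rw [if_pos hcond, if_pos ⟨hcond.1, by omega⟩]
      · rw [if_neg hcond, if_neg (by omega : ¬ (k % 2 = 0 ∧ k < 2 * (M + 1)))]

-- B reduced to the same Nat-indexed shape
lemma pvBeq (matrix : List (List Int)) (n : Int) :
    TransformMatrix_alt matrix n
      = (List.range ((n.toNat + 1) / 2)).foldl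
          (fun TM j => TM.set (2 * j)
            ((matrix.getD (2 * j) []).map (fun x => PySem.Int.floordiv x
              ((List.range n.toNat).foldl (fun s i => s + (matrix.getD i []).getD i 0) 0))))
          matrix := by
  simp only [TransformMatrix_alt]
  rw [pvRange_cast, pvRange2]
  simp only [List.foldl_map, PySem.List.pyGetD_natCast, PySem.List.pySetD_natCast]

-- ===== VERDICT (by name: the statement is the Claim_ definition above) =====
theorem TransformMatrix_spec : Claim_equal_TransformMatrix := by
  intro matrix n _ hpre
  show TransformMatrix matrix n = TransformMatrix_alt matrix n
  set N := n.toNat with hNdef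
  set trace := (List.range N).foldl (fun s i => s + (matrix.getD i []).getD i 0) 0 with htr
  set F := fun x => PySem.Int.floordiv x trace with hF
  have hN : N ≤ matrix.length := by
    rcases hpre with h | h
    · have : N = 0 := by omega
      omega
    · exact h.1
  have heven : ∀ i, i < N → i % 2 = 0 → (matrix.getD i []).length = N := by
    rcases hpre with h | h
    · intro i hi; omega
    · intro i hi he
      exact (h.2.1 i (List.mem_range.mpr hi)).2 he
  obtain ⟨hlenA, hgetA⟩ := pvOuter matrix N
    (fun k j => F ((matrix.getD k []).getD j 0))
    hN (fun i hi he => (heven i hi he).ge) N (le_refl N)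
  obtain ⟨hlenB, hgetB⟩ := pvBfold matrix (fun k => (matrix.getD k []).map F)
    ((N + 1) / 2) (by intro j hj; omega)
  apply List.ext_getElem (by rw [pvAeq, pvBeq, hlenA, hlenB])
  intro k h1 h2
  have hk : k < matrix.length := by rw [pvAeq, hlenA] at h1; exact h1
  rw [← List.getD_eq_getElem _ [] h1, ← List.getD_eq_getElem _ [] h2,
    pvAeq, pvBeq, hgetA k, hgetB k]
  by_cases h2k : k % 2 = 0
  · have hiff : k < N ↔ k < 2 * ((N + 1) / 2) := by omega
    by_cases hkN : k < N
    · rw [if_pos ⟨hkN, h2k⟩, if_pos ⟨h2k, hiff.mp hkN⟩]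
      have hlen : (matrix.getD k []).length = N := heven k hkN h2k
      rw [List.drop_of_length_le hlen.le, List.append_nil]
      have : (List.range N).map (fun j => F ((matrix.getD k []).getD j 0))
          = ((List.range N).map (fun j => (matrix.getD k []).getD j 0)).map F := by
        rw [List.map_map]; rfl
      rw [this, pvMapRange_take _ _ _ hlen.ge,
        show List.take N (matrix.getD k []) = matrix.getD k [] from
          List.take_of_length_le hlen.le]
    · rw [if_neg (fun h => hkN h.1), if_neg (fun h => hkN (hiff.mpr h.2))]
  · rw [if_neg (fun h => h2k h.2), if_neg (fun h => h2k h.1)]
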